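-- pv_equiv track=rewrite | github.com/Agnijo/TBS-Bots | Coup/utils.py | cycleplayers
-- ===== SOURCE A (Python) =====
-- def cycleplayers(playerlist,playerlives,playercredits,playercards,revealedcards):
--     while True:
--         playerlist.append(playerlist.pop(0))
--         playerlives.append(playerlives.pop(0))
--         playercredits.append(playercredits.pop(0))
--         playercards.append(playercards.pop(0))
--         revealedcards.append(revealedcards.pop(0))
--         if playerlives[0] != 0:
--             break
--     return playerlist,playerlives,playercredits,playercards,revealedcards
-- ===== SOURCE B (Python) =====
-- def cycleplayers(playerlist, playerlives, playercredits, playercards, revealedcards):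
--     # Compute the number of rotations first, then rotate each list once by slicing
--     # (in place, like A). Same return value as A on all inputs where A returns.
--     n = len(playerlives)
--     k = n
--     for i in range(1, n):
--         if playerlives[i] != 0:
--             k = i
--             break
--     for xs in (playerlist, playerlives, playercredits, playercards, revealedcards):
--         r = k % len(xs)
--         xs[:] = xs[r:] + xs[:r]
--     return playerlist, playerlives, playercredits, playercards, revealedcards
-- ===== Notes on version B (the rewrite author's own statement) =====
-- stated objective: alternative
-- what changed: Instead of repeatedly popping the front and appending until the front life is nonzero, B scans playerlives once for the first nonzero index past 0 (falling back to a full rotation) and rotates each list exactly once by slicing; it trades the pop/append loop for a single index scan plus one slice per list.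
import Mathlib
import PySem

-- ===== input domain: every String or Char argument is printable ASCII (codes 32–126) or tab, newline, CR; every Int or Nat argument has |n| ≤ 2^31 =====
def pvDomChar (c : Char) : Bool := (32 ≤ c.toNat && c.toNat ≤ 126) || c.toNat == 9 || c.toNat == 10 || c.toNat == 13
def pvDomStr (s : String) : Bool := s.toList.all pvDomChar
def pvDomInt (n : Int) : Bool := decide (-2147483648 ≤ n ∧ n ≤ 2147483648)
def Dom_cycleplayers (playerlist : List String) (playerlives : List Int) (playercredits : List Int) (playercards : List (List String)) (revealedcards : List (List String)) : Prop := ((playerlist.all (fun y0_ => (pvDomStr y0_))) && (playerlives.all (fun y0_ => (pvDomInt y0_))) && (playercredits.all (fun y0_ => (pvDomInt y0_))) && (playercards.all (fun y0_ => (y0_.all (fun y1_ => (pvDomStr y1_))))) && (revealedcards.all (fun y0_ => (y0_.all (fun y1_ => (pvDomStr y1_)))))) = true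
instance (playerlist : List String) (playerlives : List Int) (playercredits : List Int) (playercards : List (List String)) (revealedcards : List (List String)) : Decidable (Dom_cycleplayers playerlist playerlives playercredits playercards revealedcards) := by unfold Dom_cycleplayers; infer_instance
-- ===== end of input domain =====

-- B computes the rotation count by one scan of playerlives and rotates each list once by
-- slicing, instead of A's repeated pop(0)/append loop; both mutate the lists in place in
-- Python, the equivalence proved here is about the returned value.


-- ===== PORT A =====
-- xs.append(xs.pop(0)) : one left rotation step (Python raises on [], excluded by Pre_)
def pvRot1 {α : Type} (xs : List α) : List α :=
  match xs with
  | [] => []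
  | h :: t => t ++ [h]

-- the 'while True' loop; under Pre_ it stops within playerlives.length iterations,
-- which is the fuel cycleplayers supplies
def pvCycleLoop (fuel : Nat) (pl : List String) (lv pc : List Int)
    (cd rv : List (List String)) :
    List String × List Int × List Int × List (List String) × List (List String) :=
  match fuel with
  | 0 => (pl, lv, pc, cd, rv)
  | Nat.succ f =>
    let pl' := pvRot1 pl
    let lv' := pvRot1 lv
    let pc' := pvRot1 pc
    let cd' := pvRot1 cd
    let rv' := pvRot1 rv
    if lv'.headD 0 ≠ 0 then (pl', lv', pc', cd', rv')
    else pvCycleLoop f pl' lv' pc' cd' rv'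

def cycleplayers (playerlist : List String) (playerlives : List Int) (playercredits : List Int) (playercards : List (List String)) (revealedcards : List (List String)) : List String × List Int × List Int × List (List String) × List (List String) :=
  pvCycleLoop playerlives.length playerlist playerlives playercredits playercards revealedcards

-- ===== PORT B =====
-- the 'for i in range(1, n): if playerlives[i] != 0: k = i; break' scan (k defaults to n)
def pvFindK (lv : List Int) (i : Nat) : Nat :=
  if i < lv.length then
    if lv.getD i 0 ≠ 0 then i else pvFindK lv (i + 1)
  else lv.length
termination_by lv.length - i

-- xs[r:] + xs[:r] with r = k % len(xs)
def pvRotK {α : Type} (xs : List α) (k : Nat) : List α :=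
  let r := k % xs.length
  xs.drop r ++ xs.take r

def cycleplayers_alt (playerlist : List String) (playerlives : List Int) (playercredits : List Int) (playercards : List (List String)) (revealedcards : List (List String)) : List String × List Int × List Int × List (List String) × List (List String) :=
  let k := pvFindK playerlives 1
  (pvRotK playerlist k, pvRotK playerlives k, pvRotK playercredits k,
   pvRotK playercards k, pvRotK revealedcards k)

-- ===== PRECONDITION & SPEC =====
-- Pre_ excludes the inputs where A raises IndexError (any empty list: pop(0) fails) or
-- diverges (all lives zero: the loop never breaks).
def Pre_cycleplayers (playerlist : List String) (playerlives : List Int) (playercredits : List Int) (playercards : List (List String)) (revealedcards : List (List String)) : Prop :=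
  playerlist ≠ [] ∧ playerlives ≠ [] ∧ playercredits ≠ [] ∧ playercards ≠ [] ∧
  revealedcards ≠ [] ∧ ∃ x ∈ playerlives, x ≠ 0
instance (playerlist : List String) (playerlives : List Int) (playercredits : List Int) (playercards : List (List String)) (revealedcards : List (List String)) : Decidable (Pre_cycleplayers playerlist playerlives playercredits playercards revealedcards) := by unfold Pre_cycleplayers; infer_instance

def pvWitness_cycleplayers : List String × List Int × List Int × List (List String) × List (List String) :=
  (["a", "b"], [0, 1], [2, 3], [["c"], ["d"]], [[], ["e"]])

def Spec_cycleplayers (playerlist : List String) (playerlives : List Int) (playercredits : List Int) (playercards : List (List String)) (revealedcards : List (List String)) (out : List String × List Int × List Int × List (List String) × List (List String)) : Prop := out = cycleplayers_alt playerlist playerlives playercredits playercards revealedcards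
instance (playerlist : List String) (playerlives : List Int) (playercredits : List Int) (playercards : List (List String)) (revealedcards : List (List String)) (out : List String × List Int × List Int × List (List String) × List (List String)) : Decidable (Spec_cycleplayers playerlist playerlives playercredits playercards revealedcards out) := by unfold Spec_cycleplayers; infer_instance

-- ===== CLAIM (what is proved, stated in full; the proofs are below) =====
def Claim_equal_cycleplayers : Prop := ∀ (playerlist : List String) (playerlives : List Int) (playercredits : List Int) (playercards : List (List String)) (revealedcards : List (List String)), Dom_cycleplayers playerlist playerlives playercredits playercards revealedcards → Pre_cycleplayers playerlist playerlives playercredits playercards revealedcards → Spec_cycleplayers playerlist playerlives playercredits playercards revealedcards (cycleplayers playerlist playerlives playercredits playercards revealedcards)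

-- ===== LEMMAS AND PROOFS =====

lemma pvRot1_eq_rotate {α : Type} (xs : List α) : pvRot1 xs = xs.rotate 1 := by
  cases xs with
  | nil => simp [pvRot1]
  | cons h t => simp [pvRot1, List.rotate_cons_succ]

lemma pvRotK_eq_rotate {α : Type} (xs : List α) (k : Nat) : pvRotK xs k = xs.rotate k := by
  cases xs with
  | nil => simp [pvRotK]
  | cons h t =>
    have hlt : k % (h :: t).length < (h :: t).length := Nat.mod_lt _ (by simp)
    calc pvRotK (h :: t) k
        = (h :: t).rotate (k % (h :: t).length) := by
          rw [List.rotate_eq_drop_append_take (Nat.le_of_lt hlt)]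
          rfl
      _ = (h :: t).rotate k := List.rotate_mod _ _

lemma headD_rotate (lv : List Int) (h : lv ≠ []) (t : Nat) :
    (lv.rotate t).headD 0 = lv.getD (t % lv.length) 0 := by
  have hlen : 0 < lv.length := List.length_pos_iff.mpr h
  have hlt : t % lv.length < lv.length := Nat.mod_lt _ hlen
  rw [← List.rotate_mod, List.rotate_eq_drop_append_take (Nat.le_of_lt hlt),
    List.drop_eq_getElem_cons hlt, List.getD_eq_getElem lv 0 hlt]
  rfl

lemma pvCycleLoop_eq (k : Nat) (fuel : Nat) (pl : List String) (lv pc : List Int)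
    (cd rv : List (List String)) (hk1 : 1 ≤ k) (hkf : k ≤ fuel)
    (h0 : ∀ t, 1 ≤ t → t < k → (lv.rotate t).headD 0 = 0)
    (hk : (lv.rotate k).headD 0 ≠ 0) :
    pvCycleLoop fuel pl lv pc cd rv =
      (pl.rotate k, lv.rotate k, pc.rotate k, cd.rotate k, rv.rotate k) := by
  induction k generalizing fuel pl lv pc cd rv with
  | zero => omega
  | succ m ih =>
    obtain ⟨f, rfl⟩ : ∃ f, fuel = f + 1 := ⟨fuel - 1, by omega⟩
    by_cases hm : m = 0
    · subst hm
      simp only [pvCycleLoop, pvRot1_eq_rotate]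
      rw [if_pos hk]
    · have h1 : (lv.rotate 1).headD 0 = 0 := h0 1 le_rfl (by omega)
      simp only [pvCycleLoop, pvRot1_eq_rotate]
      rw [if_neg (by simpa using h1)]
      have key := ih f (pl.rotate 1) (lv.rotate 1) (pc.rotate 1) (cd.rotate 1) (rv.rotate 1)
        (by omega) (by omega)
        (fun t ht1 htm => by rw [List.rotate_rotate]; exact h0 (1 + t) (by omega) (by omega))
        (by rw [List.rotate_rotate]; rw [show 1 + m = m + 1 by omega]; exact hk)
      rw [key]
      simp [List.rotate_rotate, Nat.add_comm]

lemma pvFindK_spec (lv : List Int) (i : Nat) (h1 : 1 ≤ i) :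
    (min i lv.length ≤ pvFindK lv i ∧ pvFindK lv i ≤ lv.length) ∧
    (∀ t, i ≤ t → t < pvFindK lv i → lv.getD t 0 = 0) ∧
    (pvFindK lv i < lv.length → lv.getD (pvFindK lv i) 0 ≠ 0) := by
  fun_induction pvFindK lv i with
  | case1 i hi hne => exact ⟨⟨by omega, Nat.le_of_lt hi⟩, fun t ht1 ht2 => by omega, fun _ => hne⟩
  | case2 i hi heq ih =>
    obtain ⟨⟨ha, hb⟩, hc, hd⟩ := ih (by omega)
    refine ⟨⟨by omega, hb⟩, fun t ht1 ht2 => ?_, hd⟩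
    rcases Nat.eq_or_lt_of_le ht1 with rfl | hlt
    · simpa using heq
    · exact hc t hlt ht2
  | case3 i hi => exact ⟨⟨by omega, le_rfl⟩, fun t ht1 ht2 => by omega, fun h => by omega⟩

-- ===== VERDICT (by name: the statement is the Claim_ definition above) =====
theorem cycleplayers_spec : Claim_equal_cycleplayers := by
  intro pl lv pc cd rv _ hpre
  obtain ⟨hpl, hlv, hpc, hcd, hrv, x, hxmem, hxne⟩ := hpre
  have hlen : 0 < lv.length := List.length_pos_iff.mpr hlv
  obtain ⟨⟨hkmin, hkn⟩, hzero, hnz⟩ := pvFindK_spec lv 1 le_rfl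
  have hk1 : 1 ≤ pvFindK lv 1 := by omega
  have hkey : (lv.rotate (pvFindK lv 1)).headD 0 ≠ 0 := by
    rw [headD_rotate lv hlv]
    rcases Nat.lt_or_ge (pvFindK lv 1) lv.length with hklt | hkge
    · rw [Nat.mod_eq_of_lt hklt]; exact hnz hklt
    · have hkeq : pvFindK lv 1 = lv.length := le_antisymm hkn hkge
      rw [hkeq, Nat.mod_self]
      -- all entries at indices 1..n-1 are 0, so the witness nonzero entry is at 0
      obtain ⟨j, hj, hgj⟩ := List.mem_iff_getElem.mp hxmem
      rcases Nat.eq_zero_or_pos j with rfl | hjpos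
      · rw [List.getD_eq_getElem lv 0 hlen, hgj]; exact hxne
      · exfalso
        have := hzero j hjpos (by omega)
        rw [List.getD_eq_getElem lv 0 hj, hgj] at this
        exact hxne this
  have h0 : ∀ t, 1 ≤ t → t < pvFindK lv 1 → (lv.rotate t).headD 0 = 0 := by
    intro t ht1 htk
    rw [headD_rotate lv hlv, Nat.mod_eq_of_lt (by omega)]
    exact hzero t ht1 htk
  have hloop := pvCycleLoop_eq (pvFindK lv 1) lv.length pl lv pc cd rv hk1 hkn h0 hkey
  unfold Spec_cycleplayers cycleplayers cycleplayers_alt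
  rw [hloop]
  simp only [pvRotK_eq_rotate]
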